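-- pv_equiv track=rewrite | github.com/DazlahDjango/Falcon | apps/kpi/engine/traffic_light.py | detect_consecutive_red
-- ===== SOURCE A (Python) =====
-- from typing import Dict, List
--
-- def detect_consecutive_red(traffic_lights: List[str]) -> int:
--     consecutive = 0
--     for status in reversed(traffic_lights):
--         if status == 'RED':
--             consecutive += 1
--         else:
--             break
--     return consecutive
-- ===== SOURCE B (Python) =====
-- from typing import List
--
-- def detect_consecutive_red(traffic_lights: List[str]) -> int:
--     consecutive = 0
--     for status in traffic_lights:
--         if status == 'RED':
--             consecutive += 1
--         else:
--             consecutive = 0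
--     return consecutive
-- ===== Notes on version B (the rewrite author's own statement) =====
-- stated objective: simpler
-- what changed: Replaces the reversed iteration with early break by a single forward pass that increments on 'RED' and resets the accumulator to 0 otherwise, so only the trailing RED run survives.
import Mathlib
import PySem

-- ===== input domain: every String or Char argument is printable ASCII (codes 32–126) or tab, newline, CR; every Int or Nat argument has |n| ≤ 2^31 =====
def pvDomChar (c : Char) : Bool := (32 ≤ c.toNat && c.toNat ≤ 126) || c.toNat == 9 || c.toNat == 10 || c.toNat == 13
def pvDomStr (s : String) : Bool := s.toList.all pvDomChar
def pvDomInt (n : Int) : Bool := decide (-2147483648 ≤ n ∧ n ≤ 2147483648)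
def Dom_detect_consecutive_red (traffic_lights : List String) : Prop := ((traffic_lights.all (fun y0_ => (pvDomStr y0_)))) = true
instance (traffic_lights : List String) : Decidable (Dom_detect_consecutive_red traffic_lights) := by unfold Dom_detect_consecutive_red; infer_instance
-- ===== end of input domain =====

-- B replaces the reversed loop with early break by a forward pass that resets the counter on a non-'RED' status (simpler, same cost).

-- ===== PORT A =====
-- A iterates over reversed(traffic_lights), incrementing while status == 'RED' and breaking otherwise.
def pvA_go (rs : List String) (consecutive : Int) : Int :=
  match rs with
  | [] => consecutive
  | s :: t => if s == "RED" then pvA_go t (consecutive + 1) else consecutive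

def detect_consecutive_red (traffic_lights : List String) : Int :=
  pvA_go traffic_lights.reverse 0

-- ===== PORT B =====
def detect_consecutive_red_alt (traffic_lights : List String) : Int :=
  traffic_lights.foldl (fun consecutive status => if status == "RED" then consecutive + 1 else 0) 0

-- ===== PRECONDITION & SPEC =====
def Spec_detect_consecutive_red (traffic_lights : List String) (out : Int) : Prop := out = detect_consecutive_red_alt traffic_lights
instance (traffic_lights : List String) (out : Int) : Decidable (Spec_detect_consecutive_red traffic_lights out) := by unfold Spec_detect_consecutive_red; infer_instance

-- ===== CLAIM (what is proved, stated in full; the proofs are below) =====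
def Claim_equal_detect_consecutive_red : Prop := ∀ (traffic_lights : List String), Dom_detect_consecutive_red traffic_lights → Spec_detect_consecutive_red traffic_lights (detect_consecutive_red traffic_lights)

-- ===== LEMMAS AND PROOFS =====

-- A's loop with accumulator c equals c plus the loop started at 0.
theorem pvA_go_acc (rs : List String) (c : Int) : pvA_go rs c = c + pvA_go rs 0 := by
  induction rs generalizing c with
  | nil => simp [pvA_go]
  | cons s t ih =>
    simp only [pvA_go]
    by_cases h : s == "RED"
    · simp [h]; rw [ih (c + 1), ih 1]; ring
    · simp [h]

theorem pv_main (l : List String) :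
    l.foldl (fun consecutive status => if status == "RED" then consecutive + 1 else 0) 0
      = pvA_go l.reverse 0 := by
  induction l using List.reverseRecOn with
  | nil => simp [pvA_go]
  | append_singleton l' x ih =>
    rw [List.foldl_append, List.reverse_append]
    simp only [List.foldl, List.reverse_singleton, List.singleton_append, pvA_go]
    by_cases h : x == "RED"
    · simp only [h, ih, if_pos]
      rw [pvA_go_acc l'.reverse (0 + 1)]; ring
    · simp [h]

-- ===== VERDICT (by name: the statement is the Claim_ definition above) =====
theorem detect_consecutive_red_spec : Claim_equal_detect_consecutive_red := by
  intro l _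
  unfold Spec_detect_consecutive_red detect_consecutive_red detect_consecutive_red_alt
  exact (pv_main l).symm
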